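-- pv_equiv track=rewrite | github.com/vadushkin/LeetCodeTasks | Python/2300-2400/2316. Count Unreachable Pairs of Nodes in an Undirected Graph/v2.py | countPairs
-- ===== SOURCE A (Python) =====
-- def countPairs(n: int, edges: list[list[int]]) -> int:
--     orig = {}
--     sub = {}
--
--     for edge in edges:
--         if edge[0] in orig and edge[1] in orig:
--             if orig[edge[0]] != orig[edge[1]]:
--                 sub[orig[edge[0]]] += sub[orig[edge[1]]]
--                 tmp = orig[edge[1]]
--
--                 for i in sub[orig[edge[1]]]:
--                     orig[i] = orig[edge[0]]
--
--                 sub.pop(tmp)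
--                 orig[edge[1]] = orig[edge[0]]
--
--         elif edge[0] in orig:
--             orig[edge[1]] = orig[edge[0]]
--             sub[orig[edge[0]]].append(edge[1])
--         elif edge[1] in orig:
--             orig[edge[0]] = orig[edge[1]]
--             sub[orig[edge[1]]].append(edge[0])
--         else:
--             orig[edge[0]] = edge[0]
--             orig[edge[1]] = edge[0]
--             sub[edge[0]] = [edge[0], edge[1]]
--
--     summary = 0
--     nn = n
--
--     for exc in range(n):
--         if exc not in orig:
--             nn -= 1
--             summary += nn
--
--     for k in sub.keys():
--         summary += (nn - len(sub[k])) * len(sub[k])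
--         nn -= len(sub[k])
--
--     return summary
-- ===== SOURCE B (Python) =====
-- def countPairs(n, edges):
--     # merge-by-relabel components: node -> label dict plus label -> size dict,
--     # then a single running pair count over the component sizes
--     comp = {}
--     size = {}
--     for e in edges:
--         a, b = e[0], e[1]
--         ra = comp.get(a)
--         rb = comp.get(b)
--         if ra is None and rb is None:
--             comp[a] = a
--             comp[b] = a
--             size[a] = 2
--         elif rb is None:
--             comp[b] = ra
--             size[ra] += 1
--         elif ra is None:
--             comp[a] = rb
--             size[rb] += 1
--         elif ra != rb:
--             size[ra] += size.pop(rb)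
--             for x in comp:
--                 if comp[x] == rb:
--                     comp[x] = ra
--     sizes = list(size.values()) + [1 for x in range(n) if x not in comp]
--     ans = 0
--     rem = n
--     for s in sizes:
--         rem -= s
--         ans += s * rem
--     return ans
-- ===== Notes on version B (the rewrite author's own statement) =====
-- stated objective: alternative
-- what changed: B drops A's per-root member lists: it keeps a node-to-label dict plus a label-to-size dict, merges two components by adding their sizes and relabelling the absorbed label in one scan of the node dict, and counts pairs with a single running fold over the component sizes instead of A's two interleaved counting loops; Pre_ excludes only edges with fewer than two endpoints, where A raises IndexError.
import Mathlib
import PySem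

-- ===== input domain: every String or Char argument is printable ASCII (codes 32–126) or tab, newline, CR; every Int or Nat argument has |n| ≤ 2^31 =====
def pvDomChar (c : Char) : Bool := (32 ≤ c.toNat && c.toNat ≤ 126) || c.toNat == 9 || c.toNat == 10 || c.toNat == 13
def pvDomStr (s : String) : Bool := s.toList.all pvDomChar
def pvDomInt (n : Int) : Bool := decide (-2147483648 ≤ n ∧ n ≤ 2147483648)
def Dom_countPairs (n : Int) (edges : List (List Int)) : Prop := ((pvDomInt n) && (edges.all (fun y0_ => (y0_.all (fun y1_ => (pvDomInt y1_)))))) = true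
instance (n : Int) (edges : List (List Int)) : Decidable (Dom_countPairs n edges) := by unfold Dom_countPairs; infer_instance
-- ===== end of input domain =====

-- B replaces A's root→member-lists bookkeeping by a node→label dict plus a label→size dict
-- (merge = add sizes and relabel by one scan of the node dict) and counts pairs with one
-- running fold over the component sizes; a genuinely different state, equal cost.

-- ===== PORT A =====
-- one step of A's edge loop; state = (orig, sub)
def pvStepA (st : PySem.Dict Int Int × PySem.Dict Int (List Int)) (edge : List Int) :
    PySem.Dict Int Int × PySem.Dict Int (List Int) :=
  let orig := st.1
  let sub := st.2
  let e0 := PySem.List.pyGetD edge 0 0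
  let e1 := PySem.List.pyGetD edge 1 0
  if orig.contains e0 && orig.contains e1 then
    if orig.getD e0 0 ≠ orig.getD e1 0 then
      -- sub[orig[e0]] += sub[orig[e1]]
      let sub1 := sub.modify (orig.getD e0 0) [] (fun l => l ++ sub.getD (orig.getD e1 0) [])
      let tmp := orig.getD e1 0
      -- for i in sub[orig[e1]]: orig[i] = orig[e0]
      let l1 := sub1.getD (orig.getD e1 0) []
      let orig1 := l1.foldl (fun d i => d.insert i (d.getD e0 0)) orig
      let sub2 := sub1.erase tmp
      let orig2 := orig1.insert e1 (orig1.getD e0 0)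
      (orig2, sub2)
    else (orig, sub)
  else if orig.contains e0 then
    let orig1 := orig.insert e1 (orig.getD e0 0)
    let sub1 := sub.modify (orig1.getD e0 0) [] (fun l => l ++ [e1])
    (orig1, sub1)
  else if orig.contains e1 then
    let orig1 := orig.insert e0 (orig.getD e1 0)
    let sub1 := sub.modify (orig1.getD e1 0) [] (fun l => l ++ [e0])
    (orig1, sub1)
  else
    ((orig.insert e0 e0).insert e1 e0, sub.insert e0 [e0, e1])

-- the two counting loops after A's edge loop
def pvCountA (orig : PySem.Dict Int Int) (sub : PySem.Dict Int (List Int)) (n : Int) : Int :=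
  -- for exc in range(n): if exc not in orig: nn -= 1; summary += nn
  let p1 := (PySem.List.pyRange 0 n).foldl
    (fun (p : Int × Int) exc => if !orig.contains exc then (p.1 + (p.2 - 1), p.2 - 1) else p) (0, n)
  -- for k in sub.keys(): summary += (nn - len(sub[k])) * len(sub[k]); nn -= len(sub[k])
  let p2 := sub.keys.foldl
    (fun (p : Int × Int) k =>
      let L : Int := (sub.getD k []).length
      (p.1 + (p.2 - L) * L, p.2 - L)) p1
  p2.1

def countPairs (n : Int) (edges : List (List Int)) : Int :=
  let st := edges.foldl pvStepA (PySem.Dict.empty, PySem.Dict.empty)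
  pvCountA st.1 st.2 n

-- ===== PORT B =====
-- one step of B's edge loop; state = (comp : node → label, size : label → component size)
def pvStepB (st : PySem.Dict Int Int × PySem.Dict Int Int) (e : List Int) :
    PySem.Dict Int Int × PySem.Dict Int Int :=
  let comp := st.1
  let size := st.2
  let a := PySem.List.pyGetD e 0 0
  let b := PySem.List.pyGetD e 1 0
  match comp.get? a, comp.get? b with
  | none, none => ((comp.insert a a).insert b a, size.insert a 2)
  | some ra, none => (comp.insert b ra, size.modify ra 0 (· + 1))
  | none, some rb => (comp.insert a rb, size.modify rb 0 (· + 1))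
  | some ra, some rb =>
    if ra ≠ rb then
      -- size[ra] += size.pop(rb); then relabel rb's nodes by scanning comp
      let vb := size.getD rb 0
      let size1 := (size.erase rb).modify ra 0 (· + vb)
      (comp.keys.foldl (fun d x => if d.getD x 0 = rb then d.insert x ra else d) comp, size1)
    else (comp, size)

-- the single running pair count after B's edge loop:
-- sizes = list(size.values()) + [1 for x in range(n) if x not in comp]
-- then for s in sizes: rem -= s; ans += s * rem
def pvCountB (comp : PySem.Dict Int Int) (size : PySem.Dict Int Int) (n : Int) : Int :=
  let sizes := size.values ++
    ((PySem.List.pyRange 0 n).filter (fun x => !comp.contains x)).map (fun _ => (1 : Int))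
  let p := sizes.foldl (fun (p : Int × Int) s => (p.1 + s * (p.2 - s), p.2 - s)) (0, n)
  p.1

def countPairs_alt (n : Int) (edges : List (List Int)) : Int :=
  let st := edges.foldl pvStepB (PySem.Dict.empty, PySem.Dict.empty)
  pvCountB st.1 st.2 n

-- ===== PRECONDITION & SPEC =====
-- Pre_ excludes exactly the inputs where some edge has fewer than two endpoints: there Python A
-- raises IndexError on edge[0]/edge[1].
def Pre_countPairs (n : Int) (edges : List (List Int)) : Prop := ∀ e ∈ edges, 2 ≤ e.length
instance (n : Int) (edges : List (List Int)) : Decidable (Pre_countPairs n edges) := by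
  unfold Pre_countPairs; infer_instance
def pvWitness_countPairs : Int × List (List Int) := (4, [[0, 1], [2, 3], [1, 2]])

def Spec_countPairs (n : Int) (edges : List (List Int)) (out : Int) : Prop :=
  out = countPairs_alt n edges
instance (n : Int) (edges : List (List Int)) (out : Int) : Decidable (Spec_countPairs n edges out) := by
  unfold Spec_countPairs; infer_instance

-- ===== CLAIM (what is proved, stated in full; the proofs are below) =====
def Claim_equal_countPairs : Prop := ∀ (n : Int) (edges : List (List Int)),
  Dom_countPairs n edges → Pre_countPairs n edges → Spec_countPairs n edges (countPairs n edges)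

-- ===== LEMMAS AND PROOFS =====

-- the loop invariant: A's orig equals B's comp (kept literally equal in the proofs below),
-- and B's size dict mirrors A's sub dict entry by entry with each member list replaced
-- by its length
def pvInv (o : PySem.Dict Int Int) (s : PySem.Dict Int (List Int)) (z : PySem.Dict Int Int) : Prop :=
  o.keys.Nodup ∧ s.keys.Nodup ∧
  (∀ x r, o.get? x = some r → s.contains r = true) ∧
  (∀ r l, s.get? r = some l → r ∈ l ∧ (∀ x, x ∈ l ↔ o.get? x = some r)) ∧
  z.items = s.items.map (fun p => (p.1, (p.2.length : Int)))

-- get? on a literal-mk dict whose items come from a key-preserving map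
lemma pv_get?_mapVal {ν ν' : Type} (d : PySem.Dict Int ν) (f : Int → ν → ν') (x : Int) :
    (PySem.Dict.mk (d.items.map (fun p => (p.1, f p.1 p.2)))).get? x = (d.get? x).map (f x) := by
  obtain ⟨l⟩ := d
  induction l with
  | nil => rfl
  | cons p l ih =>
    by_cases h : p.1 = x
    · simp [PySem.Dict.get?, List.find?_cons, h]
    · simpa [PySem.Dict.get?, List.find?_cons, h] using ih

lemma pv_keys_mapVal {ν ν' : Type} (d : PySem.Dict Int ν) (f : Int → ν → ν') :
    (PySem.Dict.mk (d.items.map (fun p => (p.1, f p.1 p.2)))).keys = d.keys := by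
  simp [PySem.Dict.keys, List.map_map]

lemma pv_contains_mapVal {ν ν' : Type} (d : PySem.Dict Int ν) (f : Int → ν → ν') (x : Int) :
    (PySem.Dict.mk (d.items.map (fun p => (p.1, f p.1 p.2)))).contains x = d.contains x := by
  simp [PySem.Dict.contains, List.any_map]
  rfl

lemma pv_insert_canon {ν : Type} (d : PySem.Dict Int ν) (k : Int) (v : ν) (h : d.contains k = true) :
    (d.insert k v).items = d.items.map (fun p => (p.1, if p.1 = k then v else p.2)) := by
  rw [PySem.Dict.items_insert, if_pos h]
  refine List.map_congr_left ?_
  intro p _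
  by_cases hp : p.1 = k
  · simp [hp]
  · simp [hp]

lemma pv_find?_filter_ne {ν : Type} (l : List (Int × ν)) (k x : Int) (hxk : x ≠ k) :
    (l.filter (fun q => !(q.1 == k))).find? (fun q => q.1 == x) = l.find? (fun q => q.1 == x) := by
  have hkx : k ≠ x := fun h => hxk h.symm
  induction l with
  | nil => rfl
  | cons p l ih =>
    by_cases hpk : p.1 = k
    · have hpx : ¬ p.1 = x := by rw [hpk]; exact fun h => hxk h.symm
      simp [List.filter_cons, List.find?_cons, hpk, hpx, hxk, hkx, ih]
    · by_cases hpx : p.1 = x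
      · simp [List.filter_cons, List.find?_cons, hpk, hpx, hxk, hkx]
      · simp [List.filter_cons, List.find?_cons, hpk, hpx, hxk, hkx, ih]

lemma pv_get?_erase {ν : Type} (d : PySem.Dict Int ν) (k x : Int) :
    (d.erase k).get? x = if x = k then none else d.get? x := by
  by_cases hxk : x = k
  · subst hxk
    have hnone : (d.items.filter (fun q => !(q.1 == x))).find? (fun q => q.1 == x) = none := by
      refine List.find?_eq_none.mpr ?_
      intro q hq
      have := (List.mem_filter.mp hq).2
      simpa using this
    simp [PySem.Dict.erase, PySem.Dict.get?, hnone]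
  · simp [PySem.Dict.erase, PySem.Dict.get?, pv_find?_filter_ne _ _ _ hxk, hxk]

lemma pv_keys_erase_nodup {ν : Type} (d : PySem.Dict Int ν) (k : Int) (h : d.keys.Nodup) :
    (d.erase k).keys.Nodup := by
  have hsub : (d.erase k).items.Sublist d.items := by
    simpa [PySem.Dict.erase] using List.filter_sublist (l := d.items)
  simpa [PySem.Dict.keys] using (hsub.map (fun x => x.1)).nodup (by simpa [PySem.Dict.keys] using h)

lemma pv_contains_iff {ν : Type} (d : PySem.Dict Int ν) (x : Int) :
    d.contains x = true ↔ ∃ v, d.get? x = some v := by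
  rw [PySem.Dict.contains_eq_isSome_get?]
  exact Option.isSome_iff_exists

lemma pv_mem_items_get? {ν : Type} (d : PySem.Dict Int ν) (h : d.keys.Nodup)
    {p : Int × ν} (hp : p ∈ d.items) : d.get? p.1 = some p.2 := by
  exact PySem.Dict.get?_of_mem_items d (by simpa using hp) h

-- a key-preserving map commutes with filtering out one key
lemma pv_filter_map_key {ν ν' : Type} (l : List (Int × ν)) (g : Int → ν → ν') (k : Int) :
    (l.map (fun p => (p.1, g p.1 p.2))).filter (fun p => !(p.1 == k)) =
      (l.filter (fun p => !(p.1 == k))).map (fun p => (p.1, g p.1 p.2)) := by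
  induction l with
  | nil => rfl
  | cons p l ih =>
    by_cases hpk : p.1 = k <;> simp [List.filter_cons, hpk, ih]

-- A's relabel loop rewrites exactly the keys in l to r0
lemma pv_relabelA (l : List Int) (d : PySem.Dict Int Int) (a r0 : Int)
    (ha : d.get? a = some r0) (hal : a ∉ l) (hmem : ∀ i ∈ l, d.contains i = true) :
    (l.foldl (fun d i => d.insert i (d.getD a 0)) d).items =
      d.items.map (fun p => (p.1, if p.1 ∈ l then r0 else p.2)) := by
  induction l generalizing d with
  | nil => simp
  | cons i l ih =>
    have hci : d.contains i = true := hmem i (by simp)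
    have hgetD : d.getD a 0 = r0 := by simp [PySem.Dict.getD, ha]
    have hai : a ≠ i := fun h => hal (by simp [h])
    rw [List.foldl_cons, hgetD]
    have h1 : (d.insert i r0).get? a = some r0 := by
      rw [PySem.Dict.get?_insert, if_neg hai]; exact ha
    have h2 : a ∉ l := fun h => hal (by simp [h])
    have h3 : ∀ j ∈ l, (d.insert i r0).contains j = true := by
      intro j hj
      rw [PySem.Dict.contains_insert]
      simp [hmem j (by simp [hj])]
    rw [ih _ h1 h2 h3, pv_insert_canon d i r0 hci, List.map_map]
    refine List.map_congr_left ?_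
    intro p hp
    by_cases hpi : p.1 = i <;> by_cases hpl : p.1 ∈ l <;>
      simp [Function.comp, hpi, hpl, List.mem_cons]

-- B's relabel loop rewrites exactly the entries whose value is r1 to r0
lemma pv_relabelB (ks : List Int) (d : PySem.Dict Int Int) (r0 r1 : Int)
    (hne : r0 ≠ r1) (hnd : ks.Nodup) (hks : ∀ x ∈ ks, d.contains x = true) (hd : d.keys.Nodup) :
    (ks.foldl (fun d x => if d.getD x 0 = r1 then d.insert x r0 else d) d).items =
      d.items.map (fun p => (p.1, if p.1 ∈ ks ∧ p.2 = r1 then r0 else p.2)) := by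
  induction ks generalizing d with
  | nil => simp
  | cons x ks ih =>
    have hcx : d.contains x = true := hks x (by simp)
    obtain ⟨v, hv⟩ := (pv_contains_iff d x).mp hcx
    have hgetD : d.getD x 0 = v := by simp [PySem.Dict.getD, hv]
    rw [List.foldl_cons]
    have hd1items := pv_insert_canon d x r0 hcx
    by_cases hvr : v = r1
    · rw [if_pos (by rw [hgetD, hvr])]
      have hd1keys : (d.insert x r0).keys = d.keys := by
        simp only [PySem.Dict.keys, hd1items, List.map_map]
        rfl
      have hks1 : ∀ y ∈ ks, (d.insert x r0).contains y = true := by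
        intro y hy
        rw [PySem.Dict.contains_insert]
        simp [hks y (by simp [hy])]
      rw [ih _ hnd.of_cons hks1 (hd1keys ▸ hd), hd1items, List.map_map]
      refine List.map_congr_left ?_
      intro p hp
      by_cases hpx : p.1 = x
      · have hp2 : p.2 = v := by
          have := pv_mem_items_get? d hd hp
          rw [hpx, hv] at this
          exact Option.some.inj this.symm
        simp [Function.comp, hpx, hp2, hvr, Ne.symm hne, List.mem_cons]
      · by_cases hpl : p.1 ∈ ks <;>
          simp [Function.comp, hpx, hpl, List.mem_cons]
    · rw [if_neg (by rw [hgetD]; exact fun h => hvr h)]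
      rw [ih _ hnd.of_cons (fun y hy => hks y (by simp [hy])) hd]
      refine List.map_congr_left ?_
      intro p hp
      by_cases hpx : p.1 = x
      · have hp2 : p.2 = v := by
          have := pv_mem_items_get? d hd hp
          rw [hpx, hv] at this
          exact Option.some.inj this.symm
        simp [hpx, hp2, hvr, List.mem_cons]
      · simp [hpx, List.mem_cons]

lemma pv_get?_some_contains {ν : Type} (d : PySem.Dict Int ν) {x : Int} {v : ν}
    (h : d.get? x = some v) : d.contains x = true :=
  (pv_contains_iff d x).mpr ⟨v, h⟩

-- fresh-fresh edge: a brand-new two-node component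
lemma pv_step_new (o : PySem.Dict Int Int) (s : PySem.Dict Int (List Int))
    (z : PySem.Dict Int Int) (a b : Int)
    (hInv : pvInv o s z) (hga : o.get? a = none) (hgb : o.get? b = none) :
    pvInv ((o.insert a a).insert b a) (s.insert a [a, b]) (z.insert a 2) := by
  obtain ⟨hod, hsd, h3, h4, hz⟩ := hInv
  have hca : o.contains a = false := (PySem.Dict.get?_eq_none_iff_contains o a).mp hga
  have hsa : s.contains a = false := by
    by_contra hc
    obtain ⟨l, hl⟩ := (pv_contains_iff s a).mp (by revert hc; cases s.contains a <;> simp)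
    obtain ⟨hmem, hiff⟩ := h4 a l hl
    rw [(hiff a).mp hmem] at hga
    simp at hga
  have ho'get : ∀ x, ((o.insert a a).insert b a).get? x =
      if x = b then some a else if x = a then some a else o.get? x := by
    intro x; rw [PySem.Dict.get?_insert, PySem.Dict.get?_insert]
  refine ⟨PySem.Dict.nodup_keys_insert _ _ _ (PySem.Dict.nodup_keys_insert _ _ _ hod), ?_, ?_, ?_, ?_⟩
  · rw [PySem.Dict.keys_insert_of_not_contains s _ hsa]
    refine hsd.append (List.nodup_singleton a) ?_
    intro x hx hx'
    rw [List.mem_singleton] at hx'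
    subst hx'
    exact absurd ((PySem.Dict.contains_iff_mem_keys s x).mpr hx) (by simp [hsa])
  · intro x r h
    rw [ho'get x] at h
    rw [PySem.Dict.contains_insert]
    split_ifs at h with h1 h2
    · cases h; simp
    · cases h; simp
    · simp [h3 x r h]
  · intro r l h
    rw [PySem.Dict.get?_insert] at h
    by_cases hra : r = a
    · rw [if_pos hra] at h
      cases h
      refine ⟨by simp [hra], ?_⟩
      intro x
      rw [ho'get x, hra]
      constructor
      · intro hx
        have hx' : x = a ∨ x = b := by simpa using hx
        by_cases h1 : x = b
        · rw [if_pos h1]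
        · have h2 : x = a := by tauto
          rw [if_neg h1, if_pos h2]
      · intro hx
        by_cases h1 : x = b
        · simp [h1]
        · by_cases h2 : x = a
          · simp [h2]
          · rw [if_neg h1, if_neg h2] at hx
            exfalso
            have := h3 x a hx
            simp [hsa] at this
    · rw [if_neg hra] at h
      obtain ⟨hmem, hiff⟩ := h4 r l h
      have halnotin : a ∉ l := by
        intro hal
        rw [(hiff a).mp hal] at hga
        simp at hga
      have hblnotin : b ∉ l := by
        intro hbl
        rw [(hiff b).mp hbl] at hgb
        simp at hgb
      refine ⟨hmem, ?_⟩
      intro x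
      rw [ho'get x]
      by_cases hxb : x = b
      · subst hxb
        simp only [if_pos rfl]
        constructor
        · intro hx; exact absurd hx hblnotin
        · intro hx; cases hx; exact absurd rfl hra
      · by_cases hxa : x = a
        · subst hxa
          simp only [if_neg hxb, if_pos rfl]
          constructor
          · intro hx; exact absurd hx halnotin
          · intro hx; cases hx; exact absurd rfl hra
        · simp only [if_neg hxb, if_neg hxa]
          exact hiff x
  · have hzmk : z = PySem.Dict.mk (s.items.map (fun p => (p.1, (p.2.length : Int)))) :=
      PySem.Dict.ext hz
    have hza : z.contains a = false := by
      rw [hzmk, pv_contains_mapVal s (fun k v => (v.length : Int)) a]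
      exact hsa
    rw [PySem.Dict.items_insert, PySem.Dict.items_insert, hza, hsa]
    simp [hz]

-- one endpoint known (key u, root r), the other (w) new: attach w to r's component
lemma pv_step_attach (o : PySem.Dict Int Int) (s : PySem.Dict Int (List Int))
    (z : PySem.Dict Int Int) (u w r : Int)
    (l0 : List Int) (hInv : pvInv o s z)
    (hgu : o.get? u = some r) (hgw : o.get? w = none) (hl0 : s.get? r = some l0) :
    pvInv (o.insert w r) (s.insert r (l0 ++ [w])) (z.modify r 0 (· + 1)) := by
  obtain ⟨hod, hsd, h3, h4, hz⟩ := hInv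
  obtain ⟨hrmem, hl0iff⟩ := h4 r l0 hl0
  have hcr : s.contains r = true := pv_get?_some_contains s hl0
  have hwl0 : w ∉ l0 := by
    intro hw
    rw [(hl0iff w).mp hw] at hgw
    simp at hgw
  have ho'get : ∀ x, (o.insert w r).get? x = if x = w then some r else o.get? x := by
    intro x; rw [PySem.Dict.get?_insert]
  refine ⟨PySem.Dict.nodup_keys_insert _ _ _ hod, ?_, ?_, ?_, ?_⟩
  · rw [PySem.Dict.keys_insert_of_contains s _ hcr]
    exact hsd
  · intro x r' h
    rw [ho'get x] at h
    rw [PySem.Dict.contains_insert]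
    split_ifs at h with h1
    · cases h; simp [hcr]
    · simp [h3 x r' h]
  · intro r2 l h
    rw [PySem.Dict.get?_insert] at h
    by_cases hr2 : r2 = r
    · subst hr2
      rw [if_pos rfl] at h
      cases h
      refine ⟨by simp [hrmem], ?_⟩
      intro x
      rw [ho'get x]
      by_cases hxw : x = w
      · subst hxw; simp
      · simp only [if_neg hxw, List.mem_append, List.mem_singleton]
        constructor
        · rintro (hx | hx)
          · exact (hl0iff x).mp hx
          · exact absurd hx hxw
        · intro hx; exact Or.inl ((hl0iff x).mpr hx)
    · rw [if_neg hr2] at h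
      obtain ⟨hmem, hiff⟩ := h4 r2 l h
      have hwl : w ∉ l := by
        intro hw
        rw [(hiff w).mp hw] at hgw
        simp at hgw
      refine ⟨hmem, ?_⟩
      intro x
      rw [ho'get x]
      by_cases hxw : x = w
      · subst hxw
        simp only [if_pos rfl]
        constructor
        · intro hx; exact absurd hx hwl
        · intro hx; cases hx; exact absurd rfl hr2
      · simp only [if_neg hxw]
        exact hiff x
  · have hzmk : z = PySem.Dict.mk (s.items.map (fun p => (p.1, (p.2.length : Int)))) :=
      PySem.Dict.ext hz
    have hzr : z.get? r = some ((l0.length : Int)) := by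
      rw [hzmk, pv_get?_mapVal s (fun k v => (v.length : Int)) r, hl0]
      rfl
    have hzcr : z.contains r = true := pv_get?_some_contains z hzr
    show (z.insert r (z.getD r 0 + 1)).items = _
    rw [PySem.Dict.getD_eq_get?_getD, hzr]
    simp only [Option.getD_some]
    rw [pv_insert_canon z r _ hzcr, hz, List.map_map,
      pv_insert_canon s r _ hcr, List.map_map]
    refine List.map_congr_left ?_
    intro p hp
    by_cases hpr : p.1 = r
    · simp only [Function.comp, hpr, if_pos rfl]
      push_cast [List.length_append]
      simp
    · simp [Function.comp, hpr]

-- merge: both endpoints known with different roots; A relabels rb's member list,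
-- B relabels by scanning the whole dict — same resulting dict
lemma pv_step_merge (o : PySem.Dict Int Int) (s : PySem.Dict Int (List Int))
    (z : PySem.Dict Int Int)
    (a b ra rb : Int) (la lb : List Int) (hInv : pvInv o s z)
    (hga : o.get? a = some ra) (hgb : o.get? b = some rb) (hne : ra ≠ rb)
    (hla : s.get? ra = some la) (hlb : s.get? rb = some lb) :
    ((lb.foldl (fun d i => d.insert i (d.getD a 0)) o).insert b
        ((lb.foldl (fun d i => d.insert i (d.getD a 0)) o).getD a 0)
      = o.keys.foldl (fun d x => if d.getD x 0 = rb then d.insert x ra else d) o) ∧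
    pvInv ((lb.foldl (fun d i => d.insert i (d.getD a 0)) o).insert b
        ((lb.foldl (fun d i => d.insert i (d.getD a 0)) o).getD a 0))
      ((s.insert ra (la ++ lb)).erase rb)
      ((z.erase rb).modify ra 0 (· + z.getD rb 0)) := by
  obtain ⟨hod, hsd, h3, h4, hz⟩ := hInv
  obtain ⟨hramem, hlaiff⟩ := h4 ra la hla
  obtain ⟨hrbmem, hlbiff⟩ := h4 rb lb hlb
  have halb : a ∉ lb := by
    intro h
    rw [(hlbiff a).mp h] at hga
    exact hne (Option.some.inj hga).symm
  have hblb : b ∈ lb := (hlbiff b).mpr hgb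
  have hcontlb : ∀ i ∈ lb, o.contains i = true := fun i hi =>
    pv_get?_some_contains o ((hlbiff i).mp hi)
  -- A's relabelled dict, in canonical map form
  have ho1 : lb.foldl (fun d i => d.insert i (d.getD a 0)) o =
      PySem.Dict.mk (o.items.map (fun p => (p.1, if p.1 ∈ lb then ra else p.2))) :=
    PySem.Dict.ext (pv_relabelA lb o a ra hga halb hcontlb)
  have ho1get : ∀ x, (lb.foldl (fun d i => d.insert i (d.getD a 0)) o).get? x =
      (o.get? x).map (fun v => if x ∈ lb then ra else v) := by
    intro x
    rw [ho1]
    exact pv_get?_mapVal o (fun k v => if k ∈ lb then ra else v) x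
  have ho1getD : (lb.foldl (fun d i => d.insert i (d.getD a 0)) o).getD a 0 = ra := by
    rw [PySem.Dict.getD_eq_get?_getD (d := lb.foldl (fun d i => d.insert i (d.getD a 0)) o),
      ho1get a, hga]
    simp [halb]
  have ho1contb : (lb.foldl (fun d i => d.insert i (d.getD a 0)) o).contains b = true := by
    rw [ho1]
    rw [pv_contains_mapVal o (fun k v => if k ∈ lb then ra else v) b]
    exact pv_get?_some_contains o hgb
  -- the final insert of b changes nothing
  have ho2items : ((lb.foldl (fun d i => d.insert i (d.getD a 0)) o).insert b
      ((lb.foldl (fun d i => d.insert i (d.getD a 0)) o).getD a 0)).items =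
      o.items.map (fun p => (p.1, if p.1 ∈ lb then ra else p.2)) := by
    rw [ho1getD, pv_insert_canon _ b ra ho1contb, ho1]
    show (List.map _ (o.items.map (fun p => (p.1, if p.1 ∈ lb then ra else p.2)))) = _
    rw [List.map_map]
    refine List.map_congr_left ?_
    intro p _
    by_cases hpb : p.1 = b
    · simp [Function.comp, hpb, hblb]
    · simp [Function.comp, hpb]
  have ho2 : ((lb.foldl (fun d i => d.insert i (d.getD a 0)) o).insert b
      ((lb.foldl (fun d i => d.insert i (d.getD a 0)) o).getD a 0)) =
      PySem.Dict.mk (o.items.map (fun p => (p.1, if p.1 ∈ lb then ra else p.2))) :=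
    PySem.Dict.ext ho2items
  have ho2get : ∀ x, ((lb.foldl (fun d i => d.insert i (d.getD a 0)) o).insert b
      ((lb.foldl (fun d i => d.insert i (d.getD a 0)) o).getD a 0)).get? x =
      (o.get? x).map (fun v => if x ∈ lb then ra else v) := by
    intro x
    rw [ho2]
    exact pv_get?_mapVal o (fun k v => if k ∈ lb then ra else v) x
  -- B's relabelled dict equals it
  have hB : o.keys.foldl (fun d x => if d.getD x 0 = rb then d.insert x ra else d) o =
      PySem.Dict.mk (o.items.map (fun p => (p.1, if p.1 ∈ o.keys ∧ p.2 = rb then ra else p.2))) :=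
    PySem.Dict.ext (pv_relabelB o.keys o ra rb hne hod
      (fun x hx => (PySem.Dict.contains_iff_mem_keys o x).mpr hx) hod)
  have hBA : ((lb.foldl (fun d i => d.insert i (d.getD a 0)) o).insert b
      ((lb.foldl (fun d i => d.insert i (d.getD a 0)) o).getD a 0)) =
      o.keys.foldl (fun d x => if d.getD x 0 = rb then d.insert x ra else d) o := by
    rw [ho2, hB]
    refine PySem.Dict.ext ?_
    show o.items.map _ = o.items.map _
    refine List.map_congr_left ?_
    intro p hp
    have hkey : p.1 ∈ o.keys := List.mem_map_of_mem hp
    have hget : o.get? p.1 = some p.2 := pv_mem_items_get? o hod hp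
    have hiff : p.1 ∈ lb ↔ p.2 = rb := by
      rw [hlbiff p.1, hget]
      exact ⟨fun h => Option.some.inj h, fun h => by rw [h]⟩
    by_cases hpl : p.1 ∈ lb
    · simp [hpl, hkey, hiff.mp hpl]
    · have : ¬ p.2 = rb := fun h => hpl (hiff.mpr h)
      simp [hpl, hkey, this]
  -- the new sub dict
  have hs2get : ∀ x, ((s.insert ra (la ++ lb)).erase rb).get? x =
      if x = rb then none else if x = ra then some (la ++ lb) else s.get? x := by
    intro x
    rw [pv_get?_erase, PySem.Dict.get?_insert]
  refine ⟨hBA, ?_, ?_, ?_, ?_, ?_⟩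
  · have hkeys2 : ((lb.foldl (fun d i => d.insert i (d.getD a 0)) o).insert b
        ((lb.foldl (fun d i => d.insert i (d.getD a 0)) o).getD a 0)).keys = o.keys := by
      rw [ho2]
      exact pv_keys_mapVal o (fun k v => if k ∈ lb then ra else v)
    rw [hkeys2]
    exact hod
  · exact pv_keys_erase_nodup _ rb (PySem.Dict.nodup_keys_insert _ _ _ hsd)
  · intro x r h
    rw [ho2get x] at h
    cases hx : o.get? x with
    | none => rw [hx] at h; simp at h
    | some v =>
      rw [hx] at h
      have hv : (if x ∈ lb then ra else v) = r := Option.some.inj h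
      rw [pv_contains_iff]
      by_cases hxlb : x ∈ lb
      · rw [if_pos hxlb] at hv
        subst hv
        exact ⟨la ++ lb, by rw [hs2get, if_neg hne, if_pos rfl]⟩
      · rw [if_neg hxlb] at hv
        subst hv
        have hvrb : v ≠ rb := by
          intro hvrb
          exact hxlb ((hlbiff x).mpr (by rw [hx, hvrb]))
        obtain ⟨l', hl'⟩ := (pv_contains_iff s v).mp (h3 x v hx)
        refine ⟨if v = ra then la ++ lb else l', ?_⟩
        rw [hs2get, if_neg hvrb]
        by_cases hvra : v = ra
        · rw [if_pos hvra, if_pos hvra]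
        · rw [if_neg hvra, if_neg hvra]
          exact hl'
  · intro r l h
    rw [hs2get r] at h
    by_cases hrrb : r = rb
    · rw [if_pos hrrb] at h; simp at h
    · rw [if_neg hrrb] at h
      by_cases hrra : r = ra
      · subst hrra
        rw [if_pos rfl] at h
        cases h
        refine ⟨by simp [hramem], ?_⟩
        intro x
        rw [ho2get x, List.mem_append]
        constructor
        · rintro (hx | hx)
          · have hgx := (hlaiff x).mp hx
            have hxlb : x ∉ lb := by
              intro hxl
              have h2 := (hlbiff x).mp hxl
              rw [hgx] at h2
              exact hne (Option.some.inj h2)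
            rw [hgx]
            simp [hxlb]
          · have := (hlbiff x).mp hx
            rw [this]
            simp [hx]
        · intro hx
          cases hget : o.get? x with
          | none => rw [hget] at hx; simp at hx
          | some v =>
            rw [hget] at hx
            have hv := Option.some.inj hx
            beta_reduce at hv
            by_cases hxlb : x ∈ lb
            · exact Or.inr hxlb
            · rw [if_neg hxlb] at hv
              subst hv
              exact Or.inl ((hlaiff x).mpr hget)
      · rw [if_neg hrra] at h
        obtain ⟨hmem, hiff⟩ := h4 r l h
        refine ⟨hmem, ?_⟩
        intro x
        constructor
        · intro hx
          have hget' : o.get? x = some r := (hiff x).mp hx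
          have hxlb : x ∉ lb := by
            intro hxl
            have h2 := (hlbiff x).mp hxl
            rw [hget'] at h2
            exact hrrb (Option.some.inj h2)
          rw [ho2get x, hget']
          simp [hxlb]
        · intro h'
          rw [ho2get x] at h'
          cases hget : o.get? x with
          | none => rw [hget] at h'; simp at h'
          | some v =>
            rw [hget] at h'
            simp only [Option.map_some, Option.some.injEq] at h'
            by_cases hxlb : x ∈ lb
            · rw [if_pos hxlb] at h'
              exact absurd h'.symm hrra
            · rw [if_neg hxlb] at h'
              subst h'
              exact (hiff x).mpr hget
  · -- size dict mirrors the merged sub dict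
    have hzmk : z = PySem.Dict.mk (s.items.map (fun p => (p.1, (p.2.length : Int)))) :=
      PySem.Dict.ext hz
    have hzra : z.get? ra = some ((la.length : Int)) := by
      rw [hzmk, pv_get?_mapVal s (fun k v => (v.length : Int)) ra, hla]
      rfl
    have hzrb : z.get? rb = some ((lb.length : Int)) := by
      rw [hzmk, pv_get?_mapVal s (fun k v => (v.length : Int)) rb, hlb]
      rfl
    have hvb : z.getD rb 0 = (lb.length : Int) := by
      rw [PySem.Dict.getD_eq_get?_getD, hzrb]
      rfl
    have hegetra : (z.erase rb).get? ra = some ((la.length : Int)) := by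
      rw [pv_get?_erase, if_neg hne]
      exact hzra
    have hecra : (z.erase rb).contains ra = true := pv_get?_some_contains _ hegetra
    have e2 : (z.erase rb).items =
        (s.items.filter (fun p => !(p.1 == rb))).map (fun p => (p.1, (p.2.length : Int))) := by
      show z.items.filter (fun p => !(p.1 == rb)) = _
      rw [hz]
      exact pv_filter_map_key s.items (fun k v => (v.length : Int)) rb
    have e1 : ((s.insert ra (la ++ lb)).erase rb).items =
        (s.items.filter (fun p => !(p.1 == rb))).map
          (fun p => (p.1, if p.1 = ra then la ++ lb else p.2)) := by
      show (s.insert ra (la ++ lb)).items.filter (fun p => !(p.1 == rb)) = _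
      rw [pv_insert_canon s ra _ (pv_get?_some_contains s hla)]
      exact pv_filter_map_key s.items (fun k v => if k = ra then la ++ lb else v) rb
    show ((z.erase rb).insert ra ((z.erase rb).getD ra 0 + z.getD rb 0)).items = _
    rw [PySem.Dict.getD_eq_get?_getD, hegetra, hvb]
    simp only [Option.getD_some]
    rw [pv_insert_canon _ ra _ hecra, e2, List.map_map, e1, List.map_map]
    refine List.map_congr_left ?_
    intro p hp
    by_cases hpr : p.1 = ra
    · simp only [Function.comp, hpr, if_pos rfl]
      push_cast [List.length_append]
      simp
    · simp [Function.comp, hpr]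

-- one edge preserves the invariant and keeps the two comp dicts identical
lemma pv_step (o : PySem.Dict Int Int) (s : PySem.Dict Int (List Int))
    (z : PySem.Dict Int Int) (e : List Int) (hInv : pvInv o s z) :
    (pvStepB (o, z) e).1 = (pvStepA (o, s) e).1 ∧
    pvInv (pvStepA (o, s) e).1 (pvStepA (o, s) e).2 (pvStepB (o, z) e).2 := by
  have hInv' := hInv
  obtain ⟨hod, hsd, h3, h4, hz⟩ := hInv
  cases hga : o.get? (PySem.List.pyGetD e 0 0) with
  | none =>
    have hca : o.contains (PySem.List.pyGetD e 0 0) = false :=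
      (PySem.Dict.get?_eq_none_iff_contains o _).mp hga
    cases hgb : o.get? (PySem.List.pyGetD e 1 0) with
    | none =>
      have hcb : o.contains (PySem.List.pyGetD e 1 0) = false :=
        (PySem.Dict.get?_eq_none_iff_contains o _).mp hgb
      have hA : pvStepA (o, s) e =
          ((o.insert (PySem.List.pyGetD e 0 0) (PySem.List.pyGetD e 0 0)).insert
              (PySem.List.pyGetD e 1 0) (PySem.List.pyGetD e 0 0),
            s.insert (PySem.List.pyGetD e 0 0)
              [PySem.List.pyGetD e 0 0, PySem.List.pyGetD e 1 0]) := by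
        simp [pvStepA, hca, hcb]
      have hB : pvStepB (o, z) e =
          ((o.insert (PySem.List.pyGetD e 0 0) (PySem.List.pyGetD e 0 0)).insert
              (PySem.List.pyGetD e 1 0) (PySem.List.pyGetD e 0 0),
            z.insert (PySem.List.pyGetD e 0 0) 2) := by
        simp [pvStepB, hga, hgb]
      rw [hA, hB]
      exact ⟨rfl, pv_step_new o s z _ _ hInv' hga hgb⟩
    | some rb =>
      have hcb : o.contains (PySem.List.pyGetD e 1 0) = true := pv_get?_some_contains o hgb
      have hne01 : PySem.List.pyGetD e 0 0 ≠ PySem.List.pyGetD e 1 0 := by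
        intro h
        rw [h, hgb] at hga
        simp at hga
      obtain ⟨l0, hl0⟩ := (pv_contains_iff s rb).mp (h3 _ rb hgb)
      have hA : pvStepA (o, s) e =
          (o.insert (PySem.List.pyGetD e 0 0) rb,
           s.insert rb (l0 ++ [PySem.List.pyGetD e 0 0])) := by
        simp [pvStepA, hca, hcb, hne01, PySem.Dict.modify, PySem.Dict.getD_eq_get?_getD,
          PySem.Dict.get?_insert, hga, hgb, hl0]
      have hB : pvStepB (o, z) e =
          (o.insert (PySem.List.pyGetD e 0 0) rb, z.modify rb 0 (· + 1)) := by
        simp [pvStepB, hga, hgb]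
      rw [hA, hB]
      exact ⟨rfl, pv_step_attach o s z _ _ rb l0 hInv' hgb hga hl0⟩
  | some ra =>
    have hca : o.contains (PySem.List.pyGetD e 0 0) = true := pv_get?_some_contains o hga
    cases hgb : o.get? (PySem.List.pyGetD e 1 0) with
    | none =>
      have hcb : o.contains (PySem.List.pyGetD e 1 0) = false :=
        (PySem.Dict.get?_eq_none_iff_contains o _).mp hgb
      have hne01 : PySem.List.pyGetD e 1 0 ≠ PySem.List.pyGetD e 0 0 := by
        intro h
        rw [h, hga] at hgb
        simp at hgb
      obtain ⟨l0, hl0⟩ := (pv_contains_iff s ra).mp (h3 _ ra hga)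
      have hA : pvStepA (o, s) e =
          (o.insert (PySem.List.pyGetD e 1 0) ra,
           s.insert ra (l0 ++ [PySem.List.pyGetD e 1 0])) := by
        simp [pvStepA, hca, hcb, hne01, PySem.Dict.modify, PySem.Dict.getD_eq_get?_getD,
          PySem.Dict.get?_insert, hga, hgb, hl0]
      have hB : pvStepB (o, z) e =
          (o.insert (PySem.List.pyGetD e 1 0) ra, z.modify ra 0 (· + 1)) := by
        simp [pvStepB, hga, hgb]
      rw [hA, hB]
      exact ⟨rfl, pv_step_attach o s z _ _ ra l0 hInv' hga hgb hl0⟩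
    | some rb =>
      have hcb : o.contains (PySem.List.pyGetD e 1 0) = true := pv_get?_some_contains o hgb
      have hgetDa : o.getD (PySem.List.pyGetD e 0 0) 0 = ra := by
        rw [PySem.Dict.getD_eq_get?_getD, hga]
        rfl
      have hgetDb : o.getD (PySem.List.pyGetD e 1 0) 0 = rb := by
        rw [PySem.Dict.getD_eq_get?_getD, hgb]
        rfl
      by_cases hrr : ra = rb
      · have hA : pvStepA (o, s) e = (o, s) := by
          simp [pvStepA, hca, hcb, hgetDa, hgetDb, hrr]
        have hB : pvStepB (o, z) e = (o, z) := by
          simp [pvStepB, hga, hgb, hrr]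
        rw [hA, hB]
        exact ⟨rfl, hInv'⟩
      · obtain ⟨la, hla⟩ := (pv_contains_iff s ra).mp (h3 _ ra hga)
        obtain ⟨lb, hlb⟩ := (pv_contains_iff s rb).mp (h3 _ rb hgb)
        have hsgetDla : s.getD ra [] = la := by
          rw [PySem.Dict.getD_eq_get?_getD, hla]
          rfl
        have hsgetDlb : s.getD rb [] = lb := by
          rw [PySem.Dict.getD_eq_get?_getD, hlb]
          rfl
        have hsub1getD : (s.insert ra (la ++ lb)).getD rb [] = lb := by
          rw [PySem.Dict.getD_eq_get?_getD, PySem.Dict.get?_insert,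
            if_neg (fun h => hrr h.symm), hlb]
          rfl
        have hA : pvStepA (o, s) e =
            ((lb.foldl (fun d i => d.insert i (d.getD (PySem.List.pyGetD e 0 0) 0)) o).insert
                (PySem.List.pyGetD e 1 0)
                ((lb.foldl (fun d i => d.insert i (d.getD (PySem.List.pyGetD e 0 0) 0)) o).getD
                  (PySem.List.pyGetD e 0 0) 0),
              (s.insert ra (la ++ lb)).erase rb) := by
          simp only [pvStepA, hca, hcb, Bool.and_self, if_true, hgetDa, hgetDb,
            PySem.Dict.modify, hsgetDla, hsgetDlb, hsub1getD, ne_eq, hrr, not_false_iff, if_pos]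
        have hstep := pv_step_merge o s z (PySem.List.pyGetD e 0 0) (PySem.List.pyGetD e 1 0)
          ra rb la lb hInv' hga hgb hrr hla hlb
        have hB : pvStepB (o, z) e =
            (o.keys.foldl (fun d x => if d.getD x 0 = rb then d.insert x ra else d) o,
             (z.erase rb).modify ra 0 (· + z.getD rb 0)) := by
          simp [pvStepB, hga, hgb, hrr]
        rw [hA, hB]
        exact ⟨hstep.1.symm, hstep.2⟩

lemma pv_fold (edges : List (List Int)) : ∀ (o : PySem.Dict Int Int)
    (s : PySem.Dict Int (List Int)) (z : PySem.Dict Int Int), pvInv o s z →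
    (edges.foldl pvStepB (o, z)).1 = (edges.foldl pvStepA (o, s)).1 ∧
    pvInv (edges.foldl pvStepA (o, s)).1 (edges.foldl pvStepA (o, s)).2
      (edges.foldl pvStepB (o, z)).2 := by
  induction edges with
  | nil =>
    intro o s z hInv
    exact ⟨rfl, hInv⟩
  | cons e rest ih =>
    intro o s z hInv
    obtain ⟨h1, h2⟩ := pv_step o s z e hInv
    rw [List.foldl_cons, List.foldl_cons]
    have hpair : pvStepB (o, z) e = ((pvStepA (o, s) e).1, (pvStepB (o, z) e).2) := by
      rw [← h1]
    have hrec := ih (pvStepA (o, s) e).1 (pvStepA (o, s) e).2 (pvStepB (o, z) e).2 h2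
    rw [hpair]
    simpa using hrec

-- 2 × the running-pair loop, in closed form (symmetric in the size list: only its
-- sum and sum of squares enter, so the traversal order of the sizes is irrelevant)
lemma pv_loop2 (ls : List Int) : ∀ p : Int × Int,
    2 * (ls.foldl (fun p L => (p.1 + (p.2 - L) * L, p.2 - L)) p).1 =
      2 * p.1 + 2 * p.2 * ls.sum - ls.sum * ls.sum - (ls.map (fun L => L * L)).sum := by
  induction ls with
  | nil => intro p; simp
  | cons L ls ih =>
    intro p
    rw [List.foldl_cons, ih]
    simp only [List.sum_cons, List.map_cons]
    ring

-- the two final count computations agree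
lemma pv_final (n : Int) (o : PySem.Dict Int Int) (s : PySem.Dict Int (List Int))
    (z : PySem.Dict Int Int) (hInv : pvInv o s z) :
    pvCountA o s n = pvCountB o z n := by
  obtain ⟨hod, hsd, h3, h4, hz⟩ := hInv
  -- B's size values are exactly the lengths of A's member lists, keyed the same way
  have hzv1 : z.values = s.values.map (fun l => ((l.length : Nat) : Int)) := by
    show z.items.map (fun x => x.2) = (s.items.map (fun x => x.2)).map (fun l => ((l.length : Nat) : Int))
    rw [hz, List.map_map, List.map_map]
    rfl
  have hzvals : z.values = s.keys.map (fun k => ((s.getD k []).length : Int)) := by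
    rw [hzv1, PySem.Dict.values_eq_map_keys s hsd [], List.map_map]
    rfl
  -- A's two loops as one fold over ones ++ component sizes
  have hA0 : pvCountA o s n =
      (s.keys.foldl
        (fun (p : Int × Int) k =>
          let L : Int := (s.getD k []).length
          (p.1 + (p.2 - L) * L, p.2 - L))
        ((PySem.List.pyRange 0 n).foldl
          (fun (p : Int × Int) exc => if !o.contains exc then (p.1 + (p.2 - 1), p.2 - 1) else p)
          (0, n))).1 := rfl
  have hfirst : (PySem.List.pyRange 0 n).foldl
      (fun (p : Int × Int) exc => if !o.contains exc then (p.1 + (p.2 - 1), p.2 - 1) else p) (0, n) =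
      (((PySem.List.pyRange 0 n).filter (fun x => !o.contains x)).map (fun _ => (1 : Int))).foldl
        (fun (p : Int × Int) L => (p.1 + (p.2 - L) * L, p.2 - L)) (0, n) := by
    rw [PySem.List.foldl_if_eq_foldl_filter (p := fun x => !o.contains x)
      (f := fun (p : Int × Int) _ => (p.1 + (p.2 - 1), p.2 - 1))]
    rw [List.foldl_map]
    refine PySem.List.foldl_congr_mem _ _ _ _ ?_
    intro acc x hx
    simp
  have hsecond : ∀ (init : Int × Int), s.keys.foldl
      (fun (p : Int × Int) k =>
        let L : Int := (s.getD k []).length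
        (p.1 + (p.2 - L) * L, p.2 - L)) init =
      (s.keys.map (fun k => ((s.getD k []).length : Int))).foldl
        (fun (p : Int × Int) L => (p.1 + (p.2 - L) * L, p.2 - L)) init := by
    intro init
    rw [List.foldl_map]
  have hA1 : pvCountA o s n =
      (((((PySem.List.pyRange 0 n).filter (fun x => !o.contains x)).map (fun _ => (1 : Int))) ++
          s.keys.map (fun k => ((s.getD k []).length : Int))).foldl
        (fun (p : Int × Int) L => (p.1 + (p.2 - L) * L, p.2 - L)) (0, n)).1 := by
    rw [hA0, hfirst, hsecond, List.foldl_append]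
  -- B's single fold, with its step rewritten to A's step (s * (r - s) = (r - s) * s)
  have hstepeq : (fun (p : Int × Int) s => (p.1 + s * (p.2 - s), p.2 - s)) =
      (fun (p : Int × Int) L => (p.1 + (p.2 - L) * L, p.2 - L)) := by
    funext p L
    rw [mul_comm]
  have hB1 : pvCountB o z n =
      ((s.keys.map (fun k => ((s.getD k []).length : Int)) ++
          (((PySem.List.pyRange 0 n).filter (fun x => !o.contains x)).map (fun _ => (1 : Int)))).foldl
        (fun (p : Int × Int) L => (p.1 + (p.2 - L) * L, p.2 - L)) (0, n)).1 := by
    show ((z.values ++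
        (((PySem.List.pyRange 0 n).filter (fun x => !o.contains x)).map (fun _ => (1 : Int)))).foldl
      (fun (p : Int × Int) s => (p.1 + s * (p.2 - s), p.2 - s)) (0, n)).1 = _
    rw [hzvals, hstepeq]
  -- both are the same symmetric closed form
  set l1 := (((PySem.List.pyRange 0 n).filter (fun x => !o.contains x)).map (fun _ => (1 : Int)))
  set l2 := s.keys.map (fun k => ((s.getD k []).length : Int))
  have h2A := pv_loop2 (l1 ++ l2) (0, n)
  have h2B := pv_loop2 (l2 ++ l1) (0, n)
  rw [← hA1] at h2A
  rw [← hB1] at h2B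
  simp only [List.sum_append, List.map_append] at h2A h2B
  have key : 2 * pvCountA o s n = 2 * pvCountB o z n := by
    rw [h2A, h2B]
    ring
  omega

-- ===== VERDICT (by name: the statement is the Claim_ definition above) =====
theorem countPairs_spec : Claim_equal_countPairs := by
  intro n edges _hdom _hpre
  have hInv0 : pvInv (PySem.Dict.empty : PySem.Dict Int Int)
      (PySem.Dict.empty : PySem.Dict Int (List Int))
      (PySem.Dict.empty : PySem.Dict Int Int) := by
    refine ⟨List.nodup_nil, List.nodup_nil, ?_, ?_, rfl⟩
    · intro x r h
      simp [PySem.Dict.get?, PySem.Dict.empty] at h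
    · intro r l h
      simp [PySem.Dict.get?, PySem.Dict.empty] at h
  obtain ⟨hBA, hInv⟩ := pv_fold edges PySem.Dict.empty PySem.Dict.empty PySem.Dict.empty hInv0
  show pvCountA (edges.foldl pvStepA (PySem.Dict.empty, PySem.Dict.empty)).1
      (edges.foldl pvStepA (PySem.Dict.empty, PySem.Dict.empty)).2 n =
    pvCountB (edges.foldl pvStepB (PySem.Dict.empty, PySem.Dict.empty)).1
      (edges.foldl pvStepB (PySem.Dict.empty, PySem.Dict.empty)).2 n
  rw [hBA]
  exact pv_final n _ _ _ hInv
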